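-- pv_equiv track=rewrite | github.com/tobeyOguney/Zoo-of-Algorithms | Longest Increasing Subsequence/solution.py | log_find_retiree_idx
-- ===== SOURCE A (Python) =====
-- def log_find_retiree_idx(idx, lis, indices, start, end):
--     mid = (start + end)//2
--
--     if start == end:
--         return len(indices)
--
--     if mid == start:
--         return mid if lis[idx] <= lis[indices[mid]] else mid+1
--
--     if lis[idx] < lis[indices[mid]]:
--         return log_find_retiree_idx(idx, lis, indices, start, mid)
--
--     if lis[idx] > lis[indices[mid]]:
--         return log_find_retiree_idx(idx, lis, indices, mid+1, end)
--
--     if lis[indices[mid]] == lis[idx]: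
--         return mid
-- ===== SOURCE B (Python) =====
-- def log_find_retiree_idx(idx, lis, indices, start, end):
--     if start == end:
--         return len(indices)
--     key = lis[idx]
--     # shrink the interval until it has width 1, exiting early on an exact match
--     while end - start > 1:
--         mid = (start + end) // 2
--         x = lis[indices[mid]]
--         if x == key:
--             return mid
--         if key < x:
--             end = mid
--         else:
--             start = mid + 1
--     if start == end:
--         return len(indices)
--     return start if key <= lis[indices[start]] else start + 1
-- ===== Notes on version B (the rewrite author's own statement) =====
-- stated objective: simpler
-- what changed: The recursive four-branch search is rewritten as an iterative width-based loop (while end-start>1) that hoists the key lookup, tests equality first, and handles the width-1 base case and the empty interval after the loop instead of inside the recursion.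
-- outside the precondition, e.g. on log_find_retiree_idx(1, [10, 1], [-3, 1], 2, -3): A returns -1, B raises IndexError; on log_find_retiree_idx(0, [1, 2], [0, 1], -5, 1): A returns -2, B returns -2
import Mathlib
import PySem

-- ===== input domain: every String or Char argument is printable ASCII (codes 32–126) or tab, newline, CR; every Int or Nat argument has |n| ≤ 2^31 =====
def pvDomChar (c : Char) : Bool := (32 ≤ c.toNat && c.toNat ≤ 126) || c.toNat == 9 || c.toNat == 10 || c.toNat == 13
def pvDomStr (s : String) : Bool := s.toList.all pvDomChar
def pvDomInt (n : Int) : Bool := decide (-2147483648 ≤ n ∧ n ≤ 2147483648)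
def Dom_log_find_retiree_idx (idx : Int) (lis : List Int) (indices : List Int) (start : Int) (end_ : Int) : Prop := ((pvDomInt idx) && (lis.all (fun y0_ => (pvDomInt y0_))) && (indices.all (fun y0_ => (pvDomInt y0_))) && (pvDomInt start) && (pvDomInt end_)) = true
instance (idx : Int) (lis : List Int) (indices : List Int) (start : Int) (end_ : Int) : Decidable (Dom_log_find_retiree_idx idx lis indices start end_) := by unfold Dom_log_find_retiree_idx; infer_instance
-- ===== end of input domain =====

-- ===== PORT A =====
-- B replaces A's four-branch recursion by a width-based loop with the base cases after
-- the loop (objective: simpler). A is a data-dependent recursion, so its port uses a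
-- fuel counter ((end_-start).toNat+1 steps suffice on Pre_); list indexing is
-- PySem.List.pyGetD, total only on Pre_ (Python raises IndexError outside it).
def pvA_go (fuel : Nat) (idx : Int) (lis : List Int) (indices : List Int) (start : Int) (end_ : Int) : Int :=
  match fuel with
  | 0 => 0  -- never reached on Pre_ (fuel bounds the recursion depth)
  | fuel + 1 =>
    let mid := PySem.Int.floordiv (start + end_) 2
    if start = end_ then (indices.length : Int)
    else if mid = start then
      (if PySem.List.pyGetD lis idx 0 ≤ PySem.List.pyGetD lis (PySem.List.pyGetD indices mid 0) 0
       then mid else mid + 1)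
    else if PySem.List.pyGetD lis idx 0 < PySem.List.pyGetD lis (PySem.List.pyGetD indices mid 0) 0 then
      pvA_go fuel idx lis indices start mid
    else if PySem.List.pyGetD lis idx 0 > PySem.List.pyGetD lis (PySem.List.pyGetD indices mid 0) 0 then
      pvA_go fuel idx lis indices (mid + 1) end_
    else if PySem.List.pyGetD lis (PySem.List.pyGetD indices mid 0) 0 = PySem.List.pyGetD lis idx 0 then mid
    else 0  -- Python falls off and returns None here; unreachable by trichotomy of Int

def log_find_retiree_idx (idx : Int) (lis : List Int) (indices : List Int) (start : Int) (end_ : Int) : Int :=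
  pvA_go ((end_ - start).toNat + 1) idx lis indices start end_

-- ===== PORT B =====
-- Source B's while-loop (condition end-start>1) with fuel; the code after the loop is the
-- loop's exit branch.
def pvB_loop (fuel : Nat) (key : Int) (lis : List Int) (indices : List Int) (start : Int) (end_ : Int) : Int :=
  match fuel with
  | 0 => 0  -- never reached on Pre_
  | fuel + 1 =>
    if end_ - start > 1 then
      let mid := PySem.Int.floordiv (start + end_) 2
      let x := PySem.List.pyGetD lis (PySem.List.pyGetD indices mid 0) 0
      if x = key then mid
      else if key < x then pvB_loop fuel key lis indices start mid      -- end = mid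
      else pvB_loop fuel key lis indices (mid + 1) end_                 -- start = mid+1
    else if start = end_ then (indices.length : Int)
    else if key ≤ PySem.List.pyGetD lis (PySem.List.pyGetD indices start 0) 0 then start
    else start + 1

def log_find_retiree_idx_alt (idx : Int) (lis : List Int) (indices : List Int) (start : Int) (end_ : Int) : Int :=
  if start = end_ then (indices.length : Int)
  else
    let key := PySem.List.pyGetD lis idx 0
    pvB_loop ((end_ - start).toNat + 1) key lis indices start end_

-- ===== PRECONDITION & SPEC =====
-- Pre_ excludes the inputs on which A raises IndexError or recurses without bound
-- (out-of-range lis[idx] or lis[indices[mid]], start/end outside -len(indices)..len(indices),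
-- or start > end); being closed-form it also excludes a few inputs on which A happens to
-- return: an out-of-range entry of indices that the search never visits, or a start below
-- -len(indices) reached only through Python's negative-index wraparound.
def Pre_log_find_retiree_idx (idx : Int) (lis : List Int) (indices : List Int) (start : Int) (end_ : Int) : Prop :=
  start = end_ ∨
    (-(indices.length : Int) ≤ start ∧ start < end_ ∧ end_ ≤ (indices.length : Int) ∧
     PySem.Raise.InRange lis.length idx ∧ ∀ e ∈ indices, PySem.Raise.InRange lis.length e)
instance (idx : Int) (lis : List Int) (indices : List Int) (start : Int) (end_ : Int) : Decidable (Pre_log_find_retiree_idx idx lis indices start end_) := by unfold Pre_log_find_retiree_idx; infer_instance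

def pvWitness_log_find_retiree_idx : Int × List Int × List Int × Int × Int := (0, [3, 5], [0, 1], 0, 2)

def Spec_log_find_retiree_idx (idx : Int) (lis : List Int) (indices : List Int) (start : Int) (end_ : Int) (out : Int) : Prop := out = log_find_retiree_idx_alt idx lis indices start end_
instance (idx : Int) (lis : List Int) (indices : List Int) (start : Int) (end_ : Int) (out : Int) : Decidable (Spec_log_find_retiree_idx idx lis indices start end_ out) := by unfold Spec_log_find_retiree_idx; infer_instance

-- ===== CLAIM (what is proved, stated in full; the proofs are below) =====
def Claim_equal_log_find_retiree_idx : Prop := ∀ (idx : Int) (lis : List Int) (indices : List Int) (start : Int) (end_ : Int), Dom_log_find_retiree_idx idx lis indices start end_ → Pre_log_find_retiree_idx idx lis indices start end_ → Spec_log_find_retiree_idx idx lis indices start end_ (log_find_retiree_idx idx lis indices start end_)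

-- ===== LEMMAS AND PROOFS =====

-- midpoint facts for a nonempty interval: the midpoint stays inside, and it equals
-- start exactly when the interval has width 1
theorem pvMid_facts (s e : Int) (h : s < e) :
    s ≤ PySem.Int.floordiv (s + e) 2 ∧ PySem.Int.floordiv (s + e) 2 < e ∧
    (PySem.Int.floordiv (s + e) 2 = s ↔ e = s + 1) := by
  rw [PySem.Int.floordiv_eq_ediv_of_pos (by omega : (0:Int) < 2)]
  omega

-- with enough fuel on a well-ordered interval, A's descent and B's loop agree step by step
theorem pvA_go_eq_pvB_loop (fuel : Nat) (idx : Int) (lis : List Int) (indices : List Int)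
    (start end_ : Int) (hle : start ≤ end_) (hf : (end_ - start).toNat < fuel) :
    pvA_go fuel idx lis indices start end_ =
      pvB_loop fuel (PySem.List.pyGetD lis idx 0) lis indices start end_ := by
  induction fuel generalizing start end_ with
  | zero => omega
  | succ f ih =>
    simp only [pvA_go, pvB_loop]
    rcases eq_or_lt_of_le hle with heq | hlt
    · simp [heq]
    · obtain ⟨hms, hme, hiff⟩ := pvMid_facts start end_ hlt
      set m := PySem.Int.floordiv (start + end_) 2 with hmid
      set key := PySem.List.pyGetD lis idx 0 with hkey
      set x := PySem.List.pyGetD lis (PySem.List.pyGetD indices m 0) 0 with hx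
      by_cases hw : end_ = start + 1
      · -- width-1 interval: A's mid = start branch, B's post-loop comparison
        have hm : m = start := hiff.mpr hw
        rw [if_neg (show ¬start = end_ by omega), hm, if_pos rfl,
            if_neg (show ¬end_ - start > 1 by omega), if_neg (show ¬start = end_ by omega),
            hx, hm]
      · -- width ≥ 2: both narrow the interval or return m on an exact match
        have hm2 : ¬m = start := by rw [hiff]; exact hw
        by_cases he : x = key
        · rw [if_neg (show ¬start = end_ by omega), if_neg hm2,
              if_neg (show ¬key < x by omega), if_neg (show ¬key > x by omega), if_pos he,
              if_pos (show end_ - start > 1 by omega), if_pos he]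
        · by_cases hl : key < x
          · rw [if_neg (show ¬start = end_ by omega), if_neg hm2, if_pos hl,
                if_pos (show end_ - start > 1 by omega), if_neg he, if_pos hl]
            exact ih _ _ (by omega) (by omega)
          · rw [if_neg (show ¬start = end_ by omega), if_neg hm2, if_neg hl,
                if_pos (show key > x by omega),
                if_pos (show end_ - start > 1 by omega), if_neg he, if_neg hl]
            exact ih _ _ (by omega) (by omega)

theorem pvWitness_ok :
    Dom_log_find_retiree_idx pvWitness_log_find_retiree_idx.1 pvWitness_log_find_retiree_idx.2.1
      pvWitness_log_find_retiree_idx.2.2.1 pvWitness_log_find_retiree_idx.2.2.2.1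
      pvWitness_log_find_retiree_idx.2.2.2.2 ∧
    Pre_log_find_retiree_idx pvWitness_log_find_retiree_idx.1 pvWitness_log_find_retiree_idx.2.1
      pvWitness_log_find_retiree_idx.2.2.1 pvWitness_log_find_retiree_idx.2.2.2.1
      pvWitness_log_find_retiree_idx.2.2.2.2 := by decide

-- ===== VERDICT (by name: the statement is the Claim_ definition above) =====
theorem log_find_retiree_idx_spec : Claim_equal_log_find_retiree_idx := by
  intro idx lis indices start end_ _ hpre
  unfold Spec_log_find_retiree_idx log_find_retiree_idx log_find_retiree_idx_alt
  have hle : start ≤ end_ := by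
    rcases hpre with h | h
    · omega
    · omega
  rcases eq_or_lt_of_le hle with heq | hlt
  · subst heq; simp [pvA_go]
  · rw [if_neg (by omega)]
    exact pvA_go_eq_pvB_loop _ _ _ _ _ _ hle (by omega)
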